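-- pv_equiv track=rewrite | github.com/kylehuang33/Long-Video-Understanding | CAPTIONING/CaptionQA/server/qa_image.py | is_yesno_question
-- ===== SOURCE A (Python) =====
-- from typing import Dict, Any, List, Optional
--
-- def is_yesno_question(question_text: str, choices: List[str]) -> bool:
--     """
--     Check if question is a yes/no question.
--
--     A question is considered yes/no if:
--     1. The choices contain "Yes" and "No" (in any order, possibly with other choices), OR
--     2. The question starts with common yes/no question words (is/are, do/does/did,
--        have/has, can/could, will/would, should)
--     """
--     # Check if choices contain yes and no
--     choice_texts = [str(c).strip().lower() for c in choices]
--
--     has_yes = any("yes" in choice for choice in choice_texts)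
--     has_no = any("no" in choice for choice in choice_texts)
--
--     if has_yes and has_no:
--         return True
--
--     # Check if question starts with yes/no question words
--     question_lower = question_text.strip().lower()
--     yesno_starters = [
--         "is ", "are ", "was ", "were ",
--         "do ", "does ", "did ",
--         "have ", "has ", "had ",
--         "can ", "could ",
--         "will ", "would ",
--         "should ", "shall ",
--         "may ", "might ", "must "
--     ]
--
--     for starter in yesno_starters:
--         if question_lower.startswith(starter):
--             return True
--
--     return False
-- ===== SOURCE B (Python) =====
-- _STARTERS = frozenset({
--     "is", "are", "was", "were",
--     "do", "does", "did",
--     "have", "has", "had",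
--     "can", "could",
--     "will", "would",
--     "should", "shall",
--     "may", "might", "must",
-- })
--
--
-- def is_yesno_question(question_text, choices):
--     # Single pass with early exit: stop scanning choices once both flags hold.
--     has_yes = False
--     has_no = False
--     for c in choices:
--         if has_yes and has_no:
--             break
--         t = str(c).strip().lower()
--         has_yes = has_yes or "yes" in t
--         has_no = has_no or "no" in t
--     if has_yes and has_no:
--         return True
--     # First token via partition + one set lookup instead of 19 prefix scans.
--     head, sep, _tail = question_text.strip().lower().partition(" ")
--     return sep != "" and head in _STARTERS
-- ===== Notes on version B (the rewrite author's own statement) =====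
-- stated objective: alternative
-- what changed: B scans the choices once with an early-exit loop maintaining both flags (instead of building a lowercased list and running two any() passes) and decides the starter branch by partitioning off the first space-delimited token and doing one set lookup (instead of testing 19 string prefixes).
import Mathlib
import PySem

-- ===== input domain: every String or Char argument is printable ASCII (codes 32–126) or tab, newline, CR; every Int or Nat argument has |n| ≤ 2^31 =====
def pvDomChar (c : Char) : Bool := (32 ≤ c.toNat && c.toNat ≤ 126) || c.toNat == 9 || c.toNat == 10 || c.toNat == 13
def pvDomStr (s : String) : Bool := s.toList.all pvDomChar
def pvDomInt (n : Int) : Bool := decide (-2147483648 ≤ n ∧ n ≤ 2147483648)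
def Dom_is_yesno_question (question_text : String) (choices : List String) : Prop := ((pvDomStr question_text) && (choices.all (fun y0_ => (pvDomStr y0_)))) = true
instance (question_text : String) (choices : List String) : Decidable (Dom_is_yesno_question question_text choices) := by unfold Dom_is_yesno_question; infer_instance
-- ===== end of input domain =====

-- B replaces the two any() scans over a prebuilt list by one early-exit pass keeping both flags, and the 19 prefix tests by partitioning off the first token and one set lookup; same results, similar cost.

-- ===== PORT A =====
def pvYesnoStarters : List String :=
  ["is ", "are ", "was ", "were ",
   "do ", "does ", "did ",
   "have ", "has ", "had ",
   "can ", "could ",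
   "will ", "would ",
   "should ", "shall ",
   "may ", "might ", "must "]

def is_yesno_question (question_text : String) (choices : List String) : Bool :=
  let choice_texts := choices.map (fun c => PySem.Str.lower (PySem.Str.strip c))
  let has_yes := choice_texts.any (fun choice => PySem.Str.isIn "yes" choice)
  let has_no := choice_texts.any (fun choice => PySem.Str.isIn "no" choice)
  if has_yes && has_no then true
  else
    -- the for-loop with an early `return True` is the List.any of the starters
    let question_lower := PySem.Str.lower (PySem.Str.strip question_text)
    pvYesnoStarters.any (fun starter => PySem.Str.startswith question_lower starter)

-- ===== PORT B =====
def pvStarterSet : PySem.Set String :=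
  PySem.Set.ofList
    ["is", "are", "was", "were",
     "do", "does", "did",
     "have", "has", "had",
     "can", "could",
     "will", "would",
     "should", "shall",
     "may", "might", "must"]

-- Source B's for-loop over the choices with its early `break` once both flags hold
def pvScanChoices : List String → Bool → Bool → Bool × Bool
  | [], has_yes, has_no => (has_yes, has_no)
  | c :: rest, has_yes, has_no =>
    if has_yes && has_no then (has_yes, has_no)
    else
      let t := PySem.Str.lower (PySem.Str.strip c)
      pvScanChoices rest (has_yes || PySem.Str.isIn "yes" t) (has_no || PySem.Str.isIn "no" t)

-- hand port of str.partition(" ") for the single-char separator ' ' (exact: returns the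
-- head before the first space and whether a separator was found; Source B discards the tail)
def pvPartitionSpace : List Char → List Char × Bool
  | [] => ([], false)
  | c :: rest =>
    if c = ' ' then ([], true)
    else
      let p := pvPartitionSpace rest
      (c :: p.1, p.2)

def is_yesno_question_alt (question_text : String) (choices : List String) : Bool :=
  let flags := pvScanChoices choices false false
  if flags.1 && flags.2 then true
  else
    let p := pvPartitionSpace (PySem.Str.lower (PySem.Str.strip question_text)).toList
    p.2 && PySem.Set.contains pvStarterSet (String.ofList p.1)

-- ===== PRECONDITION & SPEC =====
def Spec_is_yesno_question (question_text : String) (choices : List String) (out : Bool) : Prop := out = is_yesno_question_alt question_text choices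
instance (question_text : String) (choices : List String) (out : Bool) : Decidable (Spec_is_yesno_question question_text choices out) := by unfold Spec_is_yesno_question; infer_instance

-- ===== CLAIM (what is proved, stated in full; the proofs are below) =====
def Claim_equal_is_yesno_question : Prop := ∀ (question_text : String) (choices : List String), Dom_is_yesno_question question_text choices → Spec_is_yesno_question question_text choices (is_yesno_question question_text choices)

-- ===== LEMMAS AND PROOFS =====

-- the 19 starter words as char lists (proof-side bridge between the two ports' constants)
def pvStarterWordChars : List (List Char) :=
  [['i','s'], ['a','r','e'], ['w','a','s'], ['w','e','r','e'],
   ['d','o'], ['d','o','e','s'], ['d','i','d'],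
   ['h','a','v','e'], ['h','a','s'], ['h','a','d'],
   ['c','a','n'], ['c','o','u','l','d'],
   ['w','i','l','l'], ['w','o','u','l','d'],
   ['s','h','o','u','l','d'], ['s','h','a','l','l'],
   ['m','a','y'], ['m','i','g','h','t'], ['m','u','s','t']]

-- B's early-exit scan computes exactly A's two any-scans
lemma scan_eq (cs : List String) : ∀ (hy hn : Bool),
    pvScanChoices cs hy hn
    = (hy || cs.any (fun c => PySem.Str.isIn "yes" (PySem.Str.lower (PySem.Str.strip c))),
       hn || cs.any (fun c => PySem.Str.isIn "no" (PySem.Str.lower (PySem.Str.strip c)))) := by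
  induction cs with
  | nil => simp [pvScanChoices]
  | cons c cs ih =>
    intro hy hn
    by_cases h : hy && hn
    · obtain ⟨h1, h2⟩ := Bool.and_eq_true_iff.mp h
      simp [pvScanChoices, h1, h2]
    · rw [pvScanChoices, if_neg h]
      rw [ih]
      simp [Bool.or_assoc]

-- B's partition is the space-free prefix plus the space-found flag
lemma partition_eq (l : List Char) :
    pvPartitionSpace l = (l.takeWhile (fun c => c != ' '), decide (' ' ∈ l)) := by
  induction l with
  | nil => simp [pvPartitionSpace]
  | cons c rest ih =>
    by_cases hc : c = ' '
    · subst hc; simp [pvPartitionSpace]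
    · simp [pvPartitionSpace, hc, ih, Ne.symm hc]

-- a starter "w " is a prefix of "tw rest" iff w is exactly tw (both space-free)
lemma prefix_word_space (w : List Char) : ∀ (tw rest : List Char), ' ' ∉ w → ' ' ∉ tw →
    (w ++ [' ']).isPrefixOf (tw ++ ' ' :: rest) = (w == tw) := by
  induction w with
  | nil =>
    intro tw rest _ htw
    cases tw with
    | nil => simp [List.isPrefixOf]
    | cons c t =>
      have hc : ¬ (' ' == c) = true := by
        simp only [beq_iff_eq]; intro h; exact htw (h ▸ List.mem_cons_self ..)
      simp [List.isPrefixOf, hc]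
  | cons a w ih =>
    intro tw rest hw htw
    cases tw with
    | nil =>
      have ha : ¬ (a == ' ') = true := by
        simp only [beq_iff_eq]; intro h; exact hw (by simp [h])
      simp [List.isPrefixOf, ha]
    | cons c t =>
      have hw' : ' ' ∉ w := fun h => hw (List.mem_cons_of_mem _ h)
      have ht' : ' ' ∉ t := fun h => htw (List.mem_cons_of_mem _ h)
      simp [List.isPrefixOf, ih t rest hw' ht', List.cons_beq_cons]

lemma prefix_word_space_none (w l : List Char) (h : ' ' ∉ l) :
    (w ++ [' ']).isPrefixOf l = false := by
  apply Bool.eq_false_iff.mpr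
  intro hpre
  exact h ((List.isPrefixOf_iff_prefix.mp hpre).subset (by simp))

-- the whole starter branch, over char lists and an arbitrary space-free word list
lemma words_branch (ws : List (List Char)) (hws : ∀ w ∈ ws, ' ' ∉ w) (l : List Char) :
    ws.any (fun w => (w ++ [' ']).isPrefixOf l)
    = ((' ' ∈ l : Bool) && ws.contains (l.takeWhile (fun c => c != ' '))) := by
  by_cases h : ' ' ∈ l
  · have htw : ' ' ∉ l.takeWhile (fun c => c != ' ') := by
      intro hm
      have := List.mem_takeWhile_imp hm
      simp at this
    have hd : l.dropWhile (fun c => c != ' ') ≠ [] := by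
      intro hnil
      have := (List.dropWhile_eq_nil_iff).mp hnil ' ' h
      simp at this
    have hhead : (l.dropWhile (fun c => c != ' ')).head hd = ' ' := by
      have := List.head_dropWhile_not (fun c => c != ' ') (w := hd)
      simpa using this
    have hdecomp : l = l.takeWhile (fun c => c != ' ') ++ ' ' ::
        (l.dropWhile (fun c => c != ' ')).tail := by
      conv_lhs => rw [← List.takeWhile_append_dropWhile (p := fun c => c != ' ') (l := l)]
      congr 1
      conv_lhs => rw [← List.cons_head_tail hd]
      rw [hhead]
    rw [Bool.eq_iff_iff]
    simp only [List.any_eq_true, Bool.and_eq_true, decide_eq_true_eq, List.contains_iff_mem]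
    constructor
    · rintro ⟨w, hwmem, hpre⟩
      rw [hdecomp, prefix_word_space w _ _ (hws w hwmem) htw, beq_iff_eq] at hpre
      exact ⟨h, hpre ▸ hwmem⟩
    · rintro ⟨-, hmem⟩
      refine ⟨_, hmem, ?_⟩
      have hp := prefix_word_space (l.takeWhile (fun c => c != ' '))
        (l.takeWhile (fun c => c != ' ')) ((l.dropWhile (fun c => c != ' ')).tail)
        (hws _ hmem) htw
      rw [← hdecomp] at hp
      rw [hp]
      simp
  · simp only [h, decide_false, Bool.false_and]
    apply List.any_eq_false.mpr
    intro w hwmem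
    simp [prefix_word_space_none w l h]

lemma contains_ofList_strings (ws : List String) (tw : List Char) :
    ws.contains (String.ofList tw) = (ws.map String.toList).contains tw := by
  rw [Bool.eq_iff_iff]
  simp only [List.contains_iff_mem, List.mem_map]
  constructor
  · intro hmem
    exact ⟨_, hmem, String.toList_ofList⟩
  · rintro ⟨a, ha, hta⟩
    have : a = String.ofList tw := String.toList_inj.mp (by rw [String.toList_ofList, hta])
    rwa [← this]

-- the two ports' starter branches agree on every question string
lemma starters_branch (q : String) :
    pvYesnoStarters.any (fun starter => PySem.Str.startswith q starter)
    = ((pvPartitionSpace q.toList).2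
        && PySem.Set.contains pvStarterSet (String.ofList (pvPartitionSpace q.toList).1)) := by
  have hmap : pvYesnoStarters.map String.toList = pvStarterWordChars.map (fun w => w ++ [' ']) := by
    decide
  have hws : ∀ w ∈ pvStarterWordChars, ' ' ∉ w := by decide
  have hany : pvYesnoStarters.any (fun starter => PySem.Str.startswith q starter)
      = pvStarterWordChars.any (fun w => (w ++ [' ']).isPrefixOf q.toList) := by
    simp only [PySem.Str.startswith, PySem.Chars.startswith]
    rw [show (fun starter => starter.toList.isPrefixOf q.toList)
        = (fun cs => cs.isPrefixOf q.toList) ∘ String.toList from rfl, ← List.any_map, hmap,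
      List.any_map]
    rfl
  rw [hany, words_branch _ hws, partition_eq]
  have hcont : ∀ tw : List Char,
      pvStarterWordChars.contains tw
      = PySem.Set.contains pvStarterSet (String.ofList tw) := by
    intro tw
    have hset : pvStarterSet =
        ["is", "are", "was", "were", "do", "does", "did", "have", "has", "had",
         "can", "could", "will", "would", "should", "shall", "may", "might", "must"] := by decide
    show _ = PySem.Set.contains pvStarterSet _
    rw [hset]
    show pvStarterWordChars.contains tw = List.contains _ _
    rw [contains_ofList_strings]
    rfl
  rw [← hcont]

-- ===== VERDICT (by name: the statement is the Claim_ definition above) =====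
theorem is_yesno_question_spec : Claim_equal_is_yesno_question := by
  intro question_text choices _
  unfold Spec_is_yesno_question is_yesno_question is_yesno_question_alt
  rw [scan_eq]
  simp only [Bool.false_or, List.any_map, Function.comp_def]
  rw [starters_branch]
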